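-- pv_equiv track=rewrite | github.com/AngelFebles/Sustainable-Wage-Tool-APIs | scripts/monthlyBudget.py | getFoodCosts
-- ===== SOURCE A (Python) =====
-- def getFoodCosts(listLength):
--
--     foodCostsList = []
--
--     current_row = 2
--     while current_row < listLength+2:
--             food_formula = f'''=(HLOOKUP('Monthly Budget'!Q{current_row},Food_means!$A$1:$E$6,2,FALSE)*'Monthly Budget'!$B{current_row}) + (HLOOKUP('Monthly Budget'!Q{current_row},Food_means!$A$1:$E$6,3,FALSE)*'Monthly Budget'!$C{current_row}) + (HLOOKUP('Monthly Budget'!Q{current_row},Food_means!$A$1:$E$6,4,FALSE)*'Monthly Budget'!$D{current_row}) + (HLOOKUP('Monthly Budget'!Q{current_row},Food_means!$A$1:$E$6,5,FALSE)*'Monthly Budget'!$E{current_row}) + (HLOOKUP('Monthly Budget'!Q{current_row},Food_means!$A$1:$E$6,6,FALSE)*'Monthly Budget'!$F{current_row})'''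
--             foodCostsList.append(food_formula)
--             current_row += 1
--
--     return foodCostsList
-- ===== SOURCE B (Python) =====
-- def getFoodCosts(listLength):
--     def term(row, col, letter):
--         return (f"(HLOOKUP('Monthly Budget'!Q{row},Food_means!$A$1:$E$6,"
--                 f"{col},FALSE)*'Monthly Budget'!${letter}{row})")
--     return ["=" + " + ".join(term(row, col, letter)
--                              for col, letter in zip([2, 3, 4, 5, 6], "BCDEF"))
--             for row in range(2, listLength + 2)]
-- ===== Notes on version B (the rewrite author's own statement) =====
-- stated objective: simpler
-- what changed: A emits each row as one huge flat f-string literal; B generates the five HLOOKUP terms from a (column index, column letter) table and joins them with ' + ', eliminating the quintuplicated template text.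
import Mathlib
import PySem

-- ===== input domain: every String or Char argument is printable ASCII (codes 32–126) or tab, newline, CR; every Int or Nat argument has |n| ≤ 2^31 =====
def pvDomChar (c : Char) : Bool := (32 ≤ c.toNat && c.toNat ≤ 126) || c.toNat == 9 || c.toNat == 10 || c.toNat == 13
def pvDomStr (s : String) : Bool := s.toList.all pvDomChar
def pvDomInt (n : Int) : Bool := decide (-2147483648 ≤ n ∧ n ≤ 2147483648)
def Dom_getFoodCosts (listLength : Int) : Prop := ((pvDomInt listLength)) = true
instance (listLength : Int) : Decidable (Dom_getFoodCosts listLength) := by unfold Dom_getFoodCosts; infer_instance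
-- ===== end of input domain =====

-- B replaces A's single flat f-string by generating the five HLOOKUP terms from a (column, letter) table and joining them (simpler decomposition, same cost).

-- ===== PORT A =====
-- A's single flat f-string, with the row number interpolated at each {current_row}
def pvA_formula (r : Int) : String :=
  "=(HLOOKUP('Monthly Budget'!Q" ++ PySem.Int.toStr r ++
  ",Food_means!$A$1:$E$6,2,FALSE)*'Monthly Budget'!$B" ++ PySem.Int.toStr r ++
  ") + (HLOOKUP('Monthly Budget'!Q" ++ PySem.Int.toStr r ++
  ",Food_means!$A$1:$E$6,3,FALSE)*'Monthly Budget'!$C" ++ PySem.Int.toStr r ++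
  ") + (HLOOKUP('Monthly Budget'!Q" ++ PySem.Int.toStr r ++
  ",Food_means!$A$1:$E$6,4,FALSE)*'Monthly Budget'!$D" ++ PySem.Int.toStr r ++
  ") + (HLOOKUP('Monthly Budget'!Q" ++ PySem.Int.toStr r ++
  ",Food_means!$A$1:$E$6,5,FALSE)*'Monthly Budget'!$E" ++ PySem.Int.toStr r ++
  ") + (HLOOKUP('Monthly Budget'!Q" ++ PySem.Int.toStr r ++
  ",Food_means!$A$1:$E$6,6,FALSE)*'Monthly Budget'!$F" ++ PySem.Int.toStr r ++ ")"

-- A's while loop; fuel = number of remaining iterations (current_row runs 2 … listLength+1)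
def pvA_loop (currentRow : Int) (fuel : Nat) (acc : List String) : List String :=
  match fuel with
  | 0 => acc
  | n + 1 => pvA_loop (currentRow + 1) n (acc ++ [pvA_formula currentRow])

def getFoodCosts (listLength : Int) : List String :=
  pvA_loop 2 (listLength.toNat) []

-- ===== PORT B =====
-- one HLOOKUP term for a given row and (column index, column letter) pair
def pvB_term (row : Int) (p : Int × String) : String :=
  "(HLOOKUP('Monthly Budget'!Q" ++ PySem.Int.toStr row ++
  ",Food_means!$A$1:$E$6," ++ PySem.Int.toStr p.1 ++
  ",FALSE)*'Monthly Budget'!$" ++ p.2 ++ PySem.Int.toStr row ++ ")"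

def pvB_cols : List (Int × String) := [(2, "B"), (3, "C"), (4, "D"), (5, "E"), (6, "F")]

-- hand port of Python's str.join (exact: "" on [], the element alone on [x], sep between elements)
def pvJoin (sep : String) : List String → String
  | [] => ""
  | [x] => x
  | x :: xs => x ++ sep ++ pvJoin sep xs

def pvB_row (row : Int) : String :=
  "=" ++ pvJoin " + " (pvB_cols.map (pvB_term row))

def getFoodCosts_alt (listLength : Int) : List String :=
  (PySem.List.pyRange 2 (listLength + 2) 1).map pvB_row

-- ===== PRECONDITION & SPEC =====
def Spec_getFoodCosts (listLength : Int) (out : List String) : Prop := out = getFoodCosts_alt listLength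
instance (listLength : Int) (out : List String) : Decidable (Spec_getFoodCosts listLength out) := by unfold Spec_getFoodCosts; infer_instance

-- ===== CLAIM (what is proved, stated in full; the proofs are below) =====
def Claim_equal_getFoodCosts : Prop := ∀ (listLength : Int), Dom_getFoodCosts listLength → Spec_getFoodCosts listLength (getFoodCosts listLength)

-- ===== LEMMAS AND PROOFS =====

-- a single row's formula is the same string either way
set_option maxRecDepth 8192 in
theorem pvRow_eq (r : Int) : pvA_formula r = pvB_row r := by
  have h2 : PySem.Int.toStr 2 = "2" := by decide
  have h3 : PySem.Int.toStr 3 = "3" := by decide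
  have h4 : PySem.Int.toStr 4 = "4" := by decide
  have h5 : PySem.Int.toStr 5 = "5" := by decide
  have h6 : PySem.Int.toStr 6 = "6" := by decide
  rw [← String.toList_inj]
  simp [pvA_formula, pvB_row, pvB_term, pvB_cols, pvJoin, h2, h3, h4, h5, h6,
        String.toList_append]

-- A's loop appends the row formulas for fuel consecutive rows starting at r
theorem pvA_loop_eq (fuel : Nat) : ∀ (r : Int) (acc : List String),
    pvA_loop r fuel acc = acc ++ (List.range fuel).map (fun (k : Nat) => pvA_formula (r + (k : Int))) := by
  induction fuel with
  | zero => intro r acc; simp [pvA_loop]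
  | succ n ih =>
      intro r acc
      rw [pvA_loop, ih, List.range_succ_eq_map]
      simp [List.map_map, Function.comp_def]
      intro k _
      congr 1
      ring

-- ===== VERDICT (by name: the statement is the Claim_ definition above) =====
theorem getFoodCosts_spec : Claim_equal_getFoodCosts := by
  intro n _
  show getFoodCosts n = getFoodCosts_alt n
  rw [getFoodCosts, getFoodCosts_alt, pvA_loop_eq, PySem.List.pyRange_one]
  have h : (n + 2 - 2).toNat = n.toNat := by omega
  rw [h]
  simp [pvRow_eq, Function.comp_def]
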